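-- pv_equiv track=rewrite | github.com/arun912-ux/C-Cpp_exams | py/srikanth_.hcl.py | longestEvenWord
-- ===== SOURCE A (Python) =====
-- def longestEvenWord(sentence):
--
--     st = sentence.split(" ")
--     dic={}
--     mx=-999
--     rt = ""
--     for s in st:
--         x = len(s)
--         if x%2==0:
--             dic[s]=x
--             mx = max(mx, x)
--
--     for (k,v) in dic.items():
--         if v==mx:
--             return k
-- ===== SOURCE B (Python) =====
-- def longestEvenWord(sentence):
--     best = ""
--     bestlen = -1
--     for s in sentence.split(" "):
--         n = len(s)
--         if n % 2 == 0 and n > bestlen: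
--             best = s
--             bestlen = n
--     return best if bestlen >= 0 else None
-- ===== Notes on version B (the rewrite author's own statement) =====
-- stated objective: simpler
-- what changed: Replaced A's dict of even-length words plus a second scan for the max value by a single pass that keeps only the running best even-length word (strict > preserves first-occurrence tie-breaking; None when no even-length word).
import Mathlib
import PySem

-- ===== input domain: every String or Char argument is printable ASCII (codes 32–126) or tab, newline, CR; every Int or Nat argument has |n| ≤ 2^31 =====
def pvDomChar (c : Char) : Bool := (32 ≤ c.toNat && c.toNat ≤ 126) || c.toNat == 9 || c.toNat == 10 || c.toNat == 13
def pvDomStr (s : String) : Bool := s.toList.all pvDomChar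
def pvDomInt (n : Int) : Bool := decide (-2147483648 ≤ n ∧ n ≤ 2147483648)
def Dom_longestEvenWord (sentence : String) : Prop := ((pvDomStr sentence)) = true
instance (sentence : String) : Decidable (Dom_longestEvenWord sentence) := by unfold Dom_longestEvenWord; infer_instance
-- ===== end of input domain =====

-- B replaces A's dict-build-then-rescan with a single pass keeping the running best even-length word (objective: simpler).

-- ===== PORT A =====
-- split(" ") has a nonempty separator, so split? is always `some`; getD [] is never the default.
def longestEvenWord (sentence : String) : Option String :=
  let st := (PySem.Str.split? sentence " ").getD []
  let dm := st.foldl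
    (fun (acc : PySem.Dict String Int × Int) s =>
      let x := PySem.Str.len s
      if PySem.Int.mod x 2 == 0 then (acc.1.insert s x, max acc.2 x) else acc)
    (PySem.Dict.empty, -999)
  (dm.1.items.find? (fun p => p.2 == dm.2)).map (·.1)

-- ===== PORT B =====
def longestEvenWord_alt (sentence : String) : Option String :=
  let r := ((PySem.Str.split? sentence " ").getD []).foldl
    (fun (acc : String × Int) s =>
      let n := PySem.Str.len s
      if PySem.Int.mod n 2 == 0 && decide (n > acc.2) then (s, n) else acc)
    ("", -1)
  if 0 ≤ r.2 then some r.1 else none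

-- ===== PRECONDITION & SPEC =====
def Spec_longestEvenWord (sentence : String) (out : Option String) : Prop := out = longestEvenWord_alt sentence
instance (sentence : String) (out : Option String) : Decidable (Spec_longestEvenWord sentence out) := by unfold Spec_longestEvenWord; infer_instance

-- ===== CLAIM (what is proved, stated in full; the proofs are below) =====
def Claim_equal_longestEvenWord : Prop := ∀ (sentence : String), Dom_longestEvenWord sentence → Spec_longestEvenWord sentence (longestEvenWord sentence)

-- ===== LEMMAS AND PROOFS =====

-- A's loop step
def pvStepA (acc : PySem.Dict String Int × Int) (s : String) : PySem.Dict String Int × Int :=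
  let x := PySem.Str.len s
  if PySem.Int.mod x 2 == 0 then (acc.1.insert s x, max acc.2 x) else acc

-- B's loop step
def pvStepB (acc : String × Int) (s : String) : String × Int :=
  let n := PySem.Str.len s
  if PySem.Int.mod n 2 == 0 && decide (n > acc.2) then (s, n) else acc

-- joint invariant of the two loops
def pvInv (d : PySem.Dict String Int) (mx : Int) (best : String) (bl : Int) : Prop :=
  (bl = -1 ∧ d.items = [] ∧ mx = -999) ∨
  (0 ≤ bl ∧ mx = bl ∧ (∀ p ∈ d.items, p.2 = PySem.Str.len p.1 ∧ p.2 ≤ mx) ∧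
    d.items.find? (fun p => p.2 == mx) = some (best, bl))

lemma pvLen_nonneg (s : String) : 0 ≤ PySem.Str.len s := by
  rw [PySem.Str.len_eq]; exact Int.natCast_nonneg _

lemma pvInv_step (s : String) (d : PySem.Dict String Int) (mx : Int) (best : String) (bl : Int)
    (h : pvInv d mx best bl) :
    pvInv (pvStepA (d, mx) s).1 (pvStepA (d, mx) s).2 (pvStepB (best, bl) s).1 (pvStepB (best, bl) s).2 := by
  have hx0 : 0 ≤ PySem.Str.len s := pvLen_nonneg s
  unfold pvStepA pvStepB
  by_cases hpar : (PySem.Int.mod (PySem.Str.len s) 2 == 0) = true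
  · by_cases hgt : bl < PySem.Str.len s
    · -- the new word becomes the best
      have hco : d.contains s = false := by
        rcases h with ⟨_, hit, _⟩ | ⟨hbl, hmx, hall, _⟩
        · simp [PySem.Dict.contains, hit]
        · by_contra hc
          simp only [Bool.not_eq_false, PySem.Dict.contains, List.any_eq_true] at hc
          obtain ⟨p, hp, hps⟩ := hc
          obtain ⟨hlen, hle⟩ := hall p hp
          have hps' : p.1 = s := by simpa using hps
          rw [hps'] at hlen
          omega
      have hit' : (d.insert s (PySem.Str.len s)).items = d.items ++ [(s, PySem.Str.len s)] :=
        PySem.Dict.items_insert_of_not_contains d _ hco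
      simp only [hpar, Bool.true_and, decide_eq_true_eq, if_pos hgt, if_true]
      right
      have hnone : d.items.find? (fun p => p.2 == PySem.Str.len s) = none := by
        rw [List.find?_eq_none]
        intro p hp
        rcases h with ⟨_, hit, _⟩ | ⟨hbl, hmx, hall, _⟩
        · simp [hit] at hp
        · obtain ⟨_, hle⟩ := hall p hp
          simp only [beq_iff_eq]
          omega
      have hmax : max mx (PySem.Str.len s) = PySem.Str.len s := by
        rcases h with ⟨_, _, hmx⟩ | ⟨hbl, hmx, _, _⟩ <;> omega
      refine ⟨by rcases h with ⟨hbl, _, _⟩ | ⟨hbl, _, _⟩ <;> omega, hmax, ?_, ?_⟩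
      · intro p hp
        rw [hit'] at hp
        rcases List.mem_append.mp hp with hp | hp
        · rcases h with ⟨_, hit, _⟩ | ⟨hbl, hmx, hall, _⟩
          · simp [hit] at hp
          · obtain ⟨hlen, hle⟩ := hall p hp
            exact ⟨hlen, by omega⟩
        · simp only [List.mem_singleton] at hp
          subst hp
          exact ⟨rfl, by omega⟩
      · rw [hit', List.find?_append, hmax, hnone, Option.none_or]
        simp [List.find?]
    · -- existing best stays (bl ≥ len s ≥ 0, so we are in the right branch of the invariant)
      rcases h with ⟨hbl, _, _⟩ | ⟨hbl, hmx, hall, hfind⟩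
      · omega
      have hmax : max mx (PySem.Str.len s) = mx := by omega
      simp only [hpar, Bool.true_and, decide_eq_true_eq, if_neg hgt, if_true, hmax]
      right
      refine ⟨hbl, hmx, ?_, ?_⟩ <;>
        by_cases hco : d.contains s = true
      · intro p hp
        rw [PySem.Dict.items_insert_of_contains d _ hco] at hp
        obtain ⟨q, hq, hqe⟩ := List.mem_map.mp hp
        by_cases hqs : (q.1 == s) = true
        · simp only [hqs, if_true] at hqe
          subst hqe
          exact ⟨rfl, by omega⟩
        · simp only [hqs, if_false, Bool.false_eq_true] at hqe
          subst hqe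
          exact hall q hq
      · intro p hp
        rw [PySem.Dict.items_insert_of_not_contains d _ (by simpa using hco)] at hp
        rcases List.mem_append.mp hp with hp | hp
        · exact hall p hp
        · simp only [List.mem_singleton] at hp
          subst hp
          exact ⟨rfl, by omega⟩
      · -- insert of an already-present key with the same value leaves items unchanged
        have hid : (d.insert s (PySem.Str.len s)).items = d.items := by
          rw [PySem.Dict.items_insert_of_contains d _ hco]
          have : ∀ p ∈ d.items, (if (p.1 == s) = true then (s, PySem.Str.len s) else p) = p := by
            intro p hp
            by_cases hps : (p.1 == s) = true
            · obtain ⟨hlen, _⟩ := hall p hp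
              have hps' : p.1 = s := by simpa using hps
              rw [if_pos hps, ← hps', ← hlen]
            · simp [hps]
          rw [List.map_congr_left this, List.map_id']
        rw [hid]; exact hfind
      · rw [PySem.Dict.items_insert_of_not_contains d _ (by simpa using hco),
            List.find?_append, hfind, Option.some_or]
  · have hpar' : (PySem.Int.mod (PySem.Str.len s) 2 == 0) = false := by
      simpa using hpar
    simp only [hpar', Bool.false_and, if_false, Bool.false_eq_true]
    exact h

lemma pvInv_loop (ws : List String) (d : PySem.Dict String Int) (mx : Int) (best : String) (bl : Int)
    (h : pvInv d mx best bl) :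
    pvInv (ws.foldl pvStepA (d, mx)).1 (ws.foldl pvStepA (d, mx)).2
          (ws.foldl pvStepB (best, bl)).1 (ws.foldl pvStepB (best, bl)).2 := by
  induction ws generalizing d mx best bl with
  | nil => simpa using h
  | cons w ws ih =>
    simp only [List.foldl_cons]
    have := pvInv_step w d mx best bl h
    rcases hA : pvStepA (d, mx) w with ⟨d', mx'⟩
    rcases hB : pvStepB (best, bl) w with ⟨best', bl'⟩
    rw [hA, hB] at this
    exact ih d' mx' best' bl' this

theorem longestEvenWord_spec : Claim_equal_longestEvenWord := by
  unfold Claim_equal_longestEvenWord Spec_longestEvenWord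
  intro sentence _
  unfold longestEvenWord longestEvenWord_alt
  have h0 : pvInv PySem.Dict.empty (-999) "" (-1) := Or.inl ⟨rfl, rfl, rfl⟩
  have h := pvInv_loop ((PySem.Str.split? sentence " ").getD []) PySem.Dict.empty (-999) "" (-1) h0
  set rA := ((PySem.Str.split? sentence " ").getD []).foldl pvStepA (PySem.Dict.empty, -999) with hrA
  set rB := ((PySem.Str.split? sentence " ").getD []).foldl pvStepB ("", -1) with hrB
  change (rA.1.items.find? (fun p => p.2 == rA.2)).map (·.1)
      = (if 0 ≤ rB.2 then some rB.1 else none)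
  rcases h with ⟨hbl, hit, _⟩ | ⟨hbl, _, _, hfind⟩
  · rw [hit, if_neg (by omega)]
    rfl
  · rw [hfind, if_pos hbl]
    rfl
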